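-- pv_equiv track=rewrite | github.com/r-1317/AtCoder | 2026/AHC064/a03.py | evaluate_mask
-- ===== SOURCE A (Python) =====
-- def is_valid_pairs(pairs):
-- 	dep_used = set()
-- 	sid_used = set()
-- 	for i, j in pairs:
-- 		if i in dep_used or j in sid_used:
-- 			return False
-- 		dep_used.add(i)
-- 		sid_used.add(j)
--
-- 	pairs_sorted = sorted(pairs)
-- 	for idx in range(len(pairs_sorted) - 1):
-- 		if not (pairs_sorted[idx][1] < pairs_sorted[idx + 1][1]):
-- 			return False
-- 	return True
--
-- def evaluate_mask(mask, candidates, force_indices):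
-- 	pairs = []
-- 	cnt = 0
-- 	has_forced = False
-- 	for idx, (i, j, _) in enumerate(candidates):
-- 		if (mask >> idx) & 1:
-- 			pairs.append((i, j))
-- 			cnt += 1
-- 			if idx in force_indices:
-- 				has_forced = True
-- 	if cnt == 0:
-- 		return -10**9
-- 	if not has_forced:
-- 		return -10**8 + cnt
-- 	if not is_valid_pairs(pairs):
-- 		return -10**6 + cnt
-- 	return cnt
-- ===== SOURCE B (Python) =====
-- def evaluate_mask(mask, candidates, force_indices):
--     pairs = [(i, j) for idx, (i, j, _) in enumerate(candidates) if (mask >> idx) & 1]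
--     cnt = len(pairs)
--     if cnt == 0:
--         return -10**9
--     if not any((mask >> idx) & 1 and idx in force_indices for idx in range(len(candidates))):
--         return -10**8 + cnt
--     ps = sorted(pairs)
--     if all(p[0] != q[0] and p[1] < q[1] for p, q in zip(ps, ps[1:])):
--         return cnt
--     return -10**6 + cnt
-- ===== Notes on version B (the rewrite author's own statement) =====
-- stated objective: simpler
-- what changed: Validation is a single sort plus one adjacent-pair pass (first coordinates differ and second coordinates strictly increase), replacing A's two-set duplicate scan followed by a separate sorted-adjacency loop; pairs/count/has_forced come from comprehensions instead of a mutating accumulator loop.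
import Mathlib
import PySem

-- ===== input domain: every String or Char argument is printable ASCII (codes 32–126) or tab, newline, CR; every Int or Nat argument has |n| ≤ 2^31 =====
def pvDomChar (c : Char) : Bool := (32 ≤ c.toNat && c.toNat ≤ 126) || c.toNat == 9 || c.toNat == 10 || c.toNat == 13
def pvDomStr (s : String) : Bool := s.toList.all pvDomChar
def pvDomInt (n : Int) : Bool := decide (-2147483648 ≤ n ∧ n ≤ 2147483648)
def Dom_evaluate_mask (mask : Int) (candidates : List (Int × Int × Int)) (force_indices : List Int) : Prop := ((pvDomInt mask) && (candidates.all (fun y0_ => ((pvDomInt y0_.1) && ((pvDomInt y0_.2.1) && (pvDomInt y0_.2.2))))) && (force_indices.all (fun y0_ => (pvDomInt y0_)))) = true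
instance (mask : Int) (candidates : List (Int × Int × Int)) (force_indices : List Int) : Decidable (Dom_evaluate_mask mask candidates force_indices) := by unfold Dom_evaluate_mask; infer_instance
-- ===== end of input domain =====

-- B replaces A's two-set duplicate scan plus separate sorted-adjacency loop by one sort and a single
-- adjacent-pair pass (objective: simpler); same return value everywhere, no side effects involved.

-- (mask >> idx) & 1 — the selection bit, identical subexpression in both Python versions
def pvBit (mask : Int) (idx : Int) : Int := PySem.Int.band (mask >>> idx) 1

-- ===== PORT A =====
-- first loop of is_valid_pairs: two sets, early False on a repeated first or second coordinate
def pvValidLoop1 : List (Int × Int) → PySem.Set Int → PySem.Set Int → Bool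
  | [], _, _ => true
  | (i, j) :: rest, dep, sid =>
    if dep.contains i || sid.contains j then false
    else pvValidLoop1 rest (dep.add i) (sid.add j)

-- second loop: for idx in range(len-1): pairs_sorted[idx][1] < pairs_sorted[idx+1][1], early False
def pvValidLoop2 : List (Int × Int) → Bool
  | p :: q :: rest => if p.2 < q.2 then pvValidLoop2 (q :: rest) else false
  | _ => true

def is_valid_pairs (pairs : List (Int × Int)) : Bool :=
  pvValidLoop1 pairs PySem.Set.empty PySem.Set.empty
    && pvValidLoop2 (PySem.List.sorted2 pairs Prod.fst Prod.snd)

def evaluate_mask (mask : Int) (candidates : List (Int × Int × Int)) (force_indices : List Int) : Int :=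
  -- accumulate (pairs, cnt, has_forced) over enumerate(candidates)
  let st := (PySem.List.enumerate candidates).foldl
    (fun (st : List (Int × Int) × Int × Bool) e =>
      if pvBit mask e.1 == 1 then
        (st.1 ++ [(e.2.1, e.2.2.1)], st.2.1 + 1, st.2.2 || force_indices.contains e.1)
      else st)
    ([], 0, false)
  if st.2.1 == 0 then -(10 ^ 9)
  else if !st.2.2 then -(10 ^ 8) + st.2.1
  else if !is_valid_pairs st.1 then -(10 ^ 6) + st.2.1
  else st.2.1

-- ===== PORT B =====
def evaluate_mask_alt (mask : Int) (candidates : List (Int × Int × Int)) (force_indices : List Int) : Int :=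
  let pairs := (PySem.List.enumerate candidates).filterMap
    (fun e => if pvBit mask e.1 == 1 then some (e.2.1, e.2.2.1) else none)
  let cnt : Int := pairs.length
  if cnt == 0 then -(10 ^ 9)
  else if !((PySem.List.pyRange 0 candidates.length 1).any
      (fun idx => pvBit mask idx == 1 && force_indices.contains idx)) then
    -(10 ^ 8) + cnt
  else
    let ps := PySem.List.sorted2 pairs Prod.fst Prod.snd
    if (ps.zip ps.tail).all
        (fun pq => pq.1.1 != pq.2.1 && decide (pq.1.2 < pq.2.2)) then cnt
    else -(10 ^ 6) + cnt

-- ===== PRECONDITION & SPEC =====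
def Spec_evaluate_mask (mask : Int) (candidates : List (Int × Int × Int)) (force_indices : List Int) (out : Int) : Prop := out = evaluate_mask_alt mask candidates force_indices
instance (mask : Int) (candidates : List (Int × Int × Int)) (force_indices : List Int) (out : Int) : Decidable (Spec_evaluate_mask mask candidates force_indices out) := by unfold Spec_evaluate_mask; infer_instance

-- ===== CLAIM (what is proved, stated in full; the proofs are below) =====
def Claim_equal_evaluate_mask : Prop := ∀ (mask : Int) (candidates : List (Int × Int × Int)) (force_indices : List Int), Dom_evaluate_mask mask candidates force_indices → Spec_evaluate_mask mask candidates force_indices (evaluate_mask mask candidates force_indices)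

-- ===== LEMMAS AND PROOFS =====

-- the selected pairs, as B builds them
def pvSelPairs (mask : Int) (l : List (Int × (Int × Int × Int))) : List (Int × Int) :=
  l.filterMap (fun e => if pvBit mask e.1 == 1 then some (e.2.1, e.2.2.1) else none)

-- whether some selected index is forced, in A's accumulated form
def pvForced (mask : Int) (force_indices : List Int) (l : List (Int × (Int × Int × Int))) : Bool :=
  l.any (fun e => pvBit mask e.1 == 1 && force_indices.contains e.1)

-- A's fold computes (pairs, len pairs, forced) — proved once, generalizing the accumulator
theorem pvFoldl_eq (mask : Int) (force_indices : List Int)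
    (l : List (Int × (Int × Int × Int))) (p0 : List (Int × Int)) (c0 : Int) (b0 : Bool) :
    l.foldl
      (fun (st : List (Int × Int) × Int × Bool) e =>
        if pvBit mask e.1 == 1 then
          (st.1 ++ [(e.2.1, e.2.2.1)], st.2.1 + 1, st.2.2 || force_indices.contains e.1)
        else st)
      (p0, c0, b0)
    = (p0 ++ pvSelPairs mask l, c0 + (pvSelPairs mask l).length, b0 || pvForced mask force_indices l) := by
  induction l generalizing p0 c0 b0 with
  | nil => simp [pvSelPairs, pvForced]
  | cons e rest ih =>
    by_cases h : (pvBit mask e.1 == 1) = true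
    · rw [List.foldl_cons, if_pos h, ih]
      simp only [pvSelPairs, pvForced, List.filterMap_cons, List.any_cons, h, if_pos,
        List.length_cons, Prod.mk.injEq]
      refine ⟨by simp, by push_cast; ring, by simp [Bool.or_assoc]⟩
    · rw [List.foldl_cons, if_neg h, ih]
      simp only [pvSelPairs, pvForced, List.filterMap_cons, List.any_cons,
        Bool.eq_false_iff.2 h]
      simp

-- pvValidLoop1 = "first coordinates distinct, second coordinates distinct, and none already in the sets"
theorem pvValidLoop1_iff (pairs : List (Int × Int)) (dep sid : PySem.Set Int) :
    pvValidLoop1 pairs dep sid = true ↔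
      ((pairs.map Prod.fst).Nodup ∧ (pairs.map Prod.snd).Nodup ∧
        ∀ p ∈ pairs, p.1 ∉ dep ∧ p.2 ∉ sid) := by
  induction pairs generalizing dep sid with
  | nil => simp [pvValidLoop1]
  | cons p rest ih =>
    obtain ⟨i, j⟩ := p
    by_cases h : i ∈ dep ∨ j ∈ sid
    · have hc : (dep.contains i || sid.contains j) = true := by
        simpa [List.contains_iff_mem] using h
      simp only [pvValidLoop1, hc, if_pos]
      constructor
      · intro hf; simp at hf
      · rintro ⟨-, -, hall⟩
        rcases hall (i, j) (by simp) with ⟨hi, hj⟩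
        simp at hi hj
        exact absurd h (by tauto)
    · push_neg at h
      have hc : (dep.contains i || sid.contains j) = false := by
        simpa [List.contains_iff_mem] using h
      have hstep : pvValidLoop1 ((i, j) :: rest) dep sid
          = pvValidLoop1 rest (dep.add i) (sid.add j) := by
        show (if (dep.contains i || sid.contains j) = true then false
            else pvValidLoop1 rest (dep.add i) (sid.add j)) = _
        rw [if_neg (by rw [hc]; simp)]
      rw [hstep, ih]
      constructor
      · rintro ⟨hf, hs, hall⟩
        refine ⟨?_, ?_, ?_⟩
        · simp only [List.map_cons, List.nodup_cons]
          refine ⟨?_, hf⟩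
          intro hmem
          rcases List.mem_map.1 hmem with ⟨q, hq, hq1⟩
          exact ((hall q hq).1 (by simp [PySem.Set.mem_add, hq1]))
        · simp only [List.map_cons, List.nodup_cons]
          refine ⟨?_, hs⟩
          intro hmem
          rcases List.mem_map.1 hmem with ⟨q, hq, hq2⟩
          exact ((hall q hq).2 (by simp [PySem.Set.mem_add, hq2]))
        · intro q hq
          rw [List.mem_cons] at hq
          rcases hq with rfl | hq
          · exact h
          · have hqm := hall q hq
            simp only [PySem.Set.mem_add] at hqm
            exact ⟨fun hm => hqm.1 (Or.inl hm), fun hm => hqm.2 (Or.inl hm)⟩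
      · rintro ⟨hf, hs, hall⟩
        simp only [List.map_cons, List.nodup_cons] at hf hs
        refine ⟨hf.2, hs.2, ?_⟩
        intro q hq
        have hq1 : q.1 ≠ i := by
          intro he; exact hf.1 (List.mem_map.2 ⟨q, hq, he⟩)
        have hq2 : q.2 ≠ j := by
          intro he; exact hs.1 (List.mem_map.2 ⟨q, hq, he⟩)
        have hqm := hall q (by simp [hq])
        constructor
        · simp only [PySem.Set.mem_add]; rintro (hm | hm)
          · exact hqm.1 hm
          · exact hq1 hm
        · simp only [PySem.Set.mem_add]; rintro (hm | hm)
          · exact hqm.2 hm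
          · exact hq2 hm

-- pvValidLoop2 = adjacent second coordinates strictly increase
theorem pvValidLoop2_iff : ∀ (l : List (Int × Int)),
    pvValidLoop2 l = true ↔ l.IsChain (fun p q => p.2 < q.2)
  | [] => by simp [pvValidLoop2]
  | [p] => by simp [pvValidLoop2]
  | p :: q :: rest => by
    rw [List.isChain_cons_cons, ← pvValidLoop2_iff (q :: rest)]
    by_cases h : p.2 < q.2 <;> simp [pvValidLoop2, h]

-- B's zip-with-tail pass = the combined adjacent condition
theorem pvZipAll_iff : ∀ (l : List (Int × Int)),
    ((l.zip l.tail).all (fun pq => pq.1.1 != pq.2.1 && decide (pq.1.2 < pq.2.2))) = true ↔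
      l.IsChain (fun p q => p.1 ≠ q.1 ∧ p.2 < q.2)
  | [] => by simp
  | [p] => by simp
  | p :: q :: rest => by
    rw [List.isChain_cons_cons, ← pvZipAll_iff (q :: rest)]
    simp [and_assoc]

-- Python's lexicographic tuple order on pairs
def pvLexLe (p q : Int × Int) : Prop := p.1 < q.1 ∨ (p.1 = q.1 ∧ p.2 ≤ q.2)

def pvLt (a b : Int × Int) : Bool :=
  decide (a.1 < b.1) || (!decide (b.1 < a.1) && decide (a.2 < b.2))

theorem pvLt_iff (a b : Int × Int) :
    pvLt a b = true ↔ (a.1 < b.1 ∨ (¬ (b.1 < a.1) ∧ a.2 < b.2)) := by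
  unfold pvLt
  by_cases h1 : a.1 < b.1 <;> by_cases h2 : b.1 < a.1 <;> by_cases h3 : a.2 < b.2 <;>
    simp [h1, h2, h3]

theorem pvSorted2_eq (xs : List (Int × Int)) :
    PySem.List.sorted2 xs Prod.fst Prod.snd =
      xs.foldl (fun acc x => PySem.List.insertBy pvLt x acc) [] := rfl

theorem pvInsertBy_pairwise (x : Int × Int) :
    ∀ (ys : List (Int × Int)), ys.Pairwise pvLexLe →
      (PySem.List.insertBy pvLt x ys).Pairwise pvLexLe
  | [], _ => by simp [PySem.List.insertBy, pvLexLe]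
  | y :: ys, h => by
    rw [List.pairwise_cons] at h
    by_cases hb : pvLt x y = true
    · have hxy : pvLexLe x y := by
        have hlt := (pvLt_iff x y).1 hb
        unfold pvLexLe; omega
      rw [show PySem.List.insertBy pvLt x (y :: ys) = x :: y :: ys from by
        simp only [PySem.List.insertBy]; rw [if_pos hb]]
      rw [List.pairwise_cons]
      refine ⟨?_, List.pairwise_cons.2 h⟩
      intro z hz
      rw [List.mem_cons] at hz
      rcases hz with rfl | hz
      · exact hxy
      · have hyz := h.1 z hz
        unfold pvLexLe at *; omega
    · have hyx : pvLexLe y x := by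
        have hnb : ¬ (x.1 < y.1 ∨ (¬ (y.1 < x.1) ∧ x.2 < y.2)) :=
          fun hh => hb ((pvLt_iff x y).2 hh)
        unfold pvLexLe; omega
      rw [show PySem.List.insertBy pvLt x (y :: ys)
            = y :: PySem.List.insertBy pvLt x ys from by
        simp only [PySem.List.insertBy]; rw [if_neg hb]]
      rw [List.pairwise_cons]
      refine ⟨?_, pvInsertBy_pairwise x ys h.2⟩
      intro z hz
      rcases (PySem.List.mem_insertBy pvLt x z ys).1 hz with rfl | hz
      · exact hyx
      · exact h.1 z hz

theorem pvSorted2_pairwise (xs : List (Int × Int)) :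
    (PySem.List.sorted2 xs Prod.fst Prod.snd).Pairwise pvLexLe := by
  rw [pvSorted2_eq]
  have : ∀ (l acc : List (Int × Int)), acc.Pairwise pvLexLe →
      (l.foldl (fun acc x => PySem.List.insertBy pvLt x acc) acc).Pairwise pvLexLe := by
    intro l
    induction l with
    | nil => intro acc h; simpa
    | cons x l ih => intro acc h; exact ih _ (pvInsertBy_pairwise x acc h)
  exact this xs [] (by simp)

-- on a lex-sorted list, the combined adjacent condition propagates to all index pairs
theorem pvChain_to_pairwise :
    ∀ {l : List (Int × Int)}, l.Pairwise pvLexLe →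
      l.IsChain (fun p q => p.1 ≠ q.1 ∧ p.2 < q.2) →
      l.Pairwise (fun p q => p.1 < q.1 ∧ p.2 < q.2)
  | [], _, _ => by simp
  | [p], _, _ => by simp
  | p :: q :: rest, hp, hc => by
    rw [List.pairwise_cons] at hp
    rw [List.isChain_cons_cons] at hc
    have htail := pvChain_to_pairwise hp.2 hc.2
    rw [List.pairwise_cons]
    refine ⟨?_, htail⟩
    have hpq : p.1 < q.1 ∧ p.2 < q.2 := by
      have h1 := hp.1 q (by simp)
      unfold pvLexLe at h1
      rcases hc.1 with ⟨hne, hlt⟩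
      exact ⟨by omega, hlt⟩
    intro z hz
    rw [List.mem_cons] at hz
    rcases hz with rfl | hz
    · exact hpq
    · have hqz := (List.pairwise_cons.1 htail).1 z hz
      exact ⟨by omega, by omega⟩

-- the heart of the equivalence: A's validation equals B's single sorted pass
theorem pvValid_eq (pairs : List (Int × Int)) :
    is_valid_pairs pairs =
      ((PySem.List.sorted2 pairs Prod.fst Prod.snd).zip
          (PySem.List.sorted2 pairs Prod.fst Prod.snd).tail).all
        (fun pq => pq.1.1 != pq.2.1 && decide (pq.1.2 < pq.2.2)) := by
  set s := PySem.List.sorted2 pairs Prod.fst Prod.snd with hs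
  have hperm : s.Perm pairs := PySem.List.sorted2_perm pairs Prod.fst Prod.snd false
  have hpw : s.Pairwise pvLexLe := pvSorted2_pairwise pairs
  have hfst : (pairs.map Prod.fst).Nodup ↔ (s.map Prod.fst).Nodup :=
    (List.Perm.nodup_iff (List.Perm.map Prod.fst hperm)).symm
  have hsnd : (pairs.map Prod.snd).Nodup ↔ (s.map Prod.snd).Nodup :=
    (List.Perm.nodup_iff (List.Perm.map Prod.snd hperm)).symm
  have key : ((pairs.map Prod.fst).Nodup ∧ (pairs.map Prod.snd).Nodup ∧
        s.IsChain (fun p q => p.2 < q.2)) ↔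
      s.IsChain (fun p q => p.1 ≠ q.1 ∧ p.2 < q.2) := by
    rw [hfst, hsnd]
    constructor
    · rintro ⟨h1, h2, hch⟩
      have hne : s.Pairwise (fun p q => p.1 ≠ q.1) := by
        rw [List.nodup_iff_pairwise_ne, List.pairwise_map] at h1
        exact h1
      rw [List.isChain_iff_getElem] at hch ⊢
      intro i hi
      refine ⟨?_, hch i hi⟩
      exact (List.pairwise_iff_getElem.1 hne) i (i + 1) (by omega) hi (by omega)
    · intro hch
      have hS := pvChain_to_pairwise hpw hch
      refine ⟨?_, ?_, ?_⟩
      · rw [List.nodup_iff_pairwise_ne, List.pairwise_map]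
        exact hS.imp (fun h => by omega)
      · rw [List.nodup_iff_pairwise_ne, List.pairwise_map]
        exact hS.imp (fun h => by omega)
      · exact hch.imp (fun a b h => h.2)
  -- both sides are decidable booleans; compare via their Prop characterizations
  rcases hA : is_valid_pairs pairs with _ | _
  · rcases hB : ((s.zip s.tail).all (fun pq => pq.1.1 != pq.2.1 && decide (pq.1.2 < pq.2.2))) with _ | _
    · rfl
    · exfalso
      have hcomb := (pvZipAll_iff s).1 hB
      have := key.2 hcomb
      have hA' : is_valid_pairs pairs = true := by
        unfold is_valid_pairs
        rw [Bool.and_eq_true, pvValidLoop1_iff, pvValidLoop2_iff]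
        exact ⟨⟨this.1, this.2.1, by simp [PySem.Set.empty]⟩, this.2.2⟩
      rw [hA] at hA'; exact absurd hA' (by simp)
  · have hA' := hA
    unfold is_valid_pairs at hA'
    rw [Bool.and_eq_true, pvValidLoop1_iff, pvValidLoop2_iff] at hA'
    rcases hA' with ⟨⟨h1, h2, -⟩, hch⟩
    exact ((pvZipAll_iff s).2 (key.1 ⟨h1, h2, hch⟩)).symm

-- A's has_forced accumulator equals B's any-over-range
theorem pvForced_eq (mask : Int) (force_indices : List Int) (candidates : List (Int × Int × Int)) :
    pvForced mask force_indices (PySem.List.enumerate candidates) =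
      (PySem.List.pyRange 0 candidates.length 1).any
        (fun idx => pvBit mask idx == 1 && force_indices.contains idx) := by
  unfold pvForced
  have := List.any_map (f := fun x : Int × (Int × Int × Int) => x.1)
    (l := PySem.List.enumerate candidates)
    (p := fun idx => pvBit mask idx == 1 && force_indices.contains idx)
  rw [PySem.List.map_fst_enumerate] at this
  simpa using this.symm

-- ===== VERDICT (by name: the statement is the Claim_ definition above) =====
theorem evaluate_mask_spec : Claim_equal_evaluate_mask := by
  intro mask candidates force_indices _
  have hswap : ∀ (c : Bool) (x y : Int), (if (!c) = true then x else y) = (if c = true then y else x) := by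
    intro c x y; cases c <;> simp
  unfold Spec_evaluate_mask evaluate_mask evaluate_mask_alt
  rw [pvFoldl_eq]
  simp only [List.nil_append, zero_add, Bool.false_or]
  rw [pvForced_eq, pvValid_eq]
  simp only [pvSelPairs]
  exact if_congr Iff.rfl rfl (if_congr Iff.rfl rfl (hswap _ _ _))
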